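-- pv_equiv track=rewrite | github.com/pypi-data/pypi-mirror-95 | packages/docdata/docdata-0.0.1-py3-none-any.whl/docdata/api.py | _strip_trailing_lines
-- ===== SOURCE A (Python) =====
-- from typing import List, Optional, TypeVar
--
-- def _strip_trailing_lines(lines: List[str]) -> List[str]:
--     """Strip trailing lines."""
--     found = False
--     rv = []
--     for line in reversed(lines):
--         if found:
--             rv.append(line)
--         elif not line:
--             continue
--         else:
--             found = True
--             rv.append(line)
--     return list(reversed(rv))
-- ===== SOURCE B (Python) =====
-- from typing import List
--
-- def _strip_trailing_lines(lines: List[str]) -> List[str]: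
--     """Strip trailing lines."""
--     end = len(lines)
--     while end > 0 and not lines[end - 1]:
--         end -= 1
--     return lines[:end]
-- ===== Notes on version B (the rewrite author's own statement) =====
-- stated objective: simpler
-- what changed: B finds the cutoff index with a backward while-loop and returns one slice, instead of reversing, skipping leading empties while accumulating into a new list, and reversing back.
import Mathlib
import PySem

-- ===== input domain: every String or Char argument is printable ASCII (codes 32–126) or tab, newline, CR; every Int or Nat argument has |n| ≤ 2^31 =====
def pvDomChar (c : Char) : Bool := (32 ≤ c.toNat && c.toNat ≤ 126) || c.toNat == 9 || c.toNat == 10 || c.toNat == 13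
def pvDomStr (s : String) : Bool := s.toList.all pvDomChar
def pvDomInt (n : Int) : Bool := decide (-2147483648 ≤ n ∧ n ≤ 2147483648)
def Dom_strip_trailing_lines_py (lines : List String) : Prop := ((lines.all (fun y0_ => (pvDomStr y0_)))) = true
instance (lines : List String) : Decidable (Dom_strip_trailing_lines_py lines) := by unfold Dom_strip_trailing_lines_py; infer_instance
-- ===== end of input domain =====

-- B replaces reverse/accumulate/reverse with a backward cutoff scan and a single take (objective: simpler).


-- ===== PORT A =====
-- literal transliteration: fold over reversed(lines) with state (found, rv); append keeps rv's order
def stripStepA (s : Bool × List String) (line : String) : Bool × List String :=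
  if s.1 then (true, s.2 ++ [line])
  else if line = "" then s
  else (true, s.2 ++ [line])

def strip_trailing_lines_py (lines : List String) : List String :=
  ((lines.reverse.foldl stripStepA (false, [])).2).reverse

-- ===== PORT B =====
-- the while-loop 'while end > 0 and not lines[end-1]: end -= 1' as structural recursion on end
def stripCut (lines : List String) : Nat → Nat
  | 0 => 0
  | n + 1 => if lines.getD n "" = "" then stripCut lines n else n + 1

def strip_trailing_lines_py_alt (lines : List String) : List String :=
  lines.take (stripCut lines lines.length)

-- ===== PRECONDITION & SPEC =====
def Spec_strip_trailing_lines_py (lines : List String) (out : List String) : Prop := out = strip_trailing_lines_py_alt lines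
instance (lines : List String) (out : List String) : Decidable (Spec_strip_trailing_lines_py lines out) := by unfold Spec_strip_trailing_lines_py; infer_instance

-- ===== CLAIM (what is proved, stated in full; the proofs are below) =====
def Claim_equal_strip_trailing_lines_py : Prop := ∀ (lines : List String), Dom_strip_trailing_lines_py lines → Spec_strip_trailing_lines_py lines (strip_trailing_lines_py lines)

-- ===== LEMMAS AND PROOFS =====

-- once found is true, A's fold just appends every remaining line
theorem foldA_found (ys : List String) (acc : List String) :
    ys.foldl stripStepA (true, acc) = (true, acc ++ ys) := by
  induction ys generalizing acc with
  | nil => simp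
  | cons y ys ih => simp [List.foldl, stripStepA, ih]

-- A on a snoc: an empty last line is dropped, a non-empty one keeps everything
theorem A_snoc_empty (l : List String) :
    strip_trailing_lines_py (l ++ [""]) = strip_trailing_lines_py l := by
  simp [strip_trailing_lines_py, stripStepA]

theorem A_snoc_ne (l : List String) (x : String) (hx : x ≠ "") :
    strip_trailing_lines_py (l ++ [x]) = l ++ [x] := by
  unfold strip_trailing_lines_py
  rw [List.reverse_append]
  simp only [List.reverse_singleton, List.singleton_append, List.foldl_cons]
  have hstep : stripStepA (false, []) x = (true, [x]) := by simp [stripStepA, hx]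
  rw [hstep, foldA_found]
  simp

-- stripCut only inspects indices below its bound
theorem stripCut_append (l : List String) (x : String) (n : Nat) (hn : n ≤ l.length) :
    stripCut (l ++ [x]) n = stripCut l n := by
  induction n with
  | zero => rfl
  | succ n ih =>
      have h1 : n < l.length := hn
      have : (l ++ [x]).getD n "" = l.getD n "" := by
        simp [List.getD, List.getElem?_append_left h1]
      simp only [stripCut, this, ih (Nat.le_of_lt h1)]

theorem stripCut_le (l : List String) (n : Nat) : stripCut l n ≤ n := by
  induction n with
  | zero => simp [stripCut]
  | succ n ih =>
      simp only [stripCut]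
      split
      · exact Nat.le_succ_of_le ih
      · exact Nat.le_refl _

theorem B_snoc_empty (l : List String) :
    strip_trailing_lines_py_alt (l ++ [""]) = strip_trailing_lines_py_alt l := by
  have hc : stripCut (l ++ [""]) (l.length + 1) = stripCut l l.length := by
    have hg : (l ++ [""]).getD l.length "" = "" := by
      simp [List.getD]
    simp only [stripCut, hg]
    simp [stripCut_append l "" l.length (Nat.le_refl _)]
  have hle : stripCut l l.length ≤ l.length := stripCut_le l l.length
  simp [strip_trailing_lines_py_alt, hc, List.take_append_of_le_length hle]

theorem B_snoc_ne (l : List String) (x : String) (hx : x ≠ "") :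
    strip_trailing_lines_py_alt (l ++ [x]) = l ++ [x] := by
  simp [strip_trailing_lines_py_alt, stripCut, List.getD, hx]


-- ===== VERDICT (by name: the statement is the Claim_ definition above) =====
theorem strip_AB (lines : List String) :
    strip_trailing_lines_py lines = strip_trailing_lines_py_alt lines := by
  induction lines using List.reverseRecOn with
  | nil => rfl
  | append_singleton l x ih =>
      by_cases hx : x = ""
      · subst hx
        rw [A_snoc_empty, B_snoc_empty]
        exact ih
      · rw [A_snoc_ne l x hx, B_snoc_ne l x hx]

theorem strip_trailing_lines_py_spec : Claim_equal_strip_trailing_lines_py :=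
  fun lines _ => strip_AB lines
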